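-- pv_equiv track=rewrite | github.com/Accessible-Technology-in-Sign/PopSign | Assets/PopSignMain/Scripts/Python/level_util.py | count_bubbles
-- ===== SOURCE A (Python) =====
-- def count_bubbles(game_lines):
--     """Returns the count of bubbles in a level's lines."""
--     bubbles = ['1', '2', '3', '4', '5', '6']
--     count = 0
--     for line in game_lines:
--         for c in line:
--             if c in bubbles:
--                 count += 1
--     return count
-- ===== SOURCE B (Python) =====
-- def count_bubbles(game_lines):
--     """Returns the count of bubbles in a level's lines."""
--     text = "".join(game_lines)
--     return sum(text.count(d) for d in '123456')
-- ===== Notes on version B (the rewrite author's own statement) =====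
-- stated objective: idiomatic
-- what changed: B joins the lines once and then makes six staged library passes, one str.count per bubble digit, summing the six results, instead of A's nested per-character loops with a membership test against a six-element list.
import Mathlib
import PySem

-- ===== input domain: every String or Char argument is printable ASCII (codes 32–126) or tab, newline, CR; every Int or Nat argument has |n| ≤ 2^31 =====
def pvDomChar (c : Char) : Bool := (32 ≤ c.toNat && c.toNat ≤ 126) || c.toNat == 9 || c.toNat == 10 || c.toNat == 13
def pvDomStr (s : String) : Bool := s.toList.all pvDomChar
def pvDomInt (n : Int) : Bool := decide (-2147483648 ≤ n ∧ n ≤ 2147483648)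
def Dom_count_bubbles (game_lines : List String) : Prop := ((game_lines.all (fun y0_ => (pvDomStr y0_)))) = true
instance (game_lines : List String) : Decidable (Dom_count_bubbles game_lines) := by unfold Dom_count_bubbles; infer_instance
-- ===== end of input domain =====

-- B joins the lines once and then makes six staged str.count passes, one per bubble digit, summing the results, instead of A's nested per-character loops with a membership test; objective: idiomatic staged library passes.


-- ===== PORT A =====
def count_bubbles (game_lines : List String) : Int :=
  let bubbles : List Char := ['1', '2', '3', '4', '5', '6']
  game_lines.foldl (fun count line =>
    line.toList.foldl (fun count c =>
      if c ∈ bubbles then count + 1 else count) count) 0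

-- ===== PORT B =====
def count_bubbles_alt (game_lines : List String) : Int :=
  let text := PySem.Str.join "" game_lines
  ("123456".toList.map (fun d => (PySem.Str.count text (String.ofList [d]) : Int))).sum

-- ===== PRECONDITION & SPEC =====
def Spec_count_bubbles (game_lines : List String) (out : Int) : Prop := out = count_bubbles_alt game_lines
instance (game_lines : List String) (out : Int) : Decidable (Spec_count_bubbles game_lines out) := by unfold Spec_count_bubbles; infer_instance

-- ===== CLAIM =====
def Claim_equal_count_bubbles : Prop := ∀ (game_lines : List String), Dom_count_bubbles game_lines → Spec_count_bubbles game_lines (count_bubbles game_lines)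

-- ===== LEMMAS AND PROOFS =====

-- joining with the empty separator is concatenation
theorem chars_join_nil (css : List (List Char)) :
    PySem.Chars.join [] css = css.flatten := by
  induction css with
  | nil => simp [PySem.Chars.join_nil]
  | cons c cs ih =>
    cases cs with
    | nil => simp [PySem.Chars.join, List.intercalate]
    | cons d ds =>
      rw [PySem.Chars.join_cons_cons, List.flatten_cons, ih]
      simp

-- Python's s.count(d) for a one-character needle counts occurrences of that character
theorem count_go_single (d : Char) (l : List Char) (fuel acc : Nat) (h : l.length ≤ fuel) :
    PySem.Chars.count.go [d] fuel l acc = acc + l.count d := by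
  induction l generalizing fuel acc with
  | nil => cases fuel <;> simp [PySem.Chars.count.go]
  | cons c t ih =>
    cases fuel with
    | zero => simp at h
    | succ f =>
      have hf : t.length ≤ f := by simp at h; omega
      rw [PySem.Chars.count.go]
      by_cases hc : d = c
      · subst hc
        simp [List.isPrefixOf, ih f (acc + 1) hf, List.count_cons_self]
        omega
      · have hb : (d == c) = false := beq_eq_false_iff_ne.mpr hc
        simp [List.isPrefixOf, hb, ih f acc hf]
        exact (List.count_cons_of_ne (fun he => hc he.symm)).symm

theorem count_single (s : List Char) (d : Char) :
    PySem.Chars.count s [d] = s.count d := by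
  rw [PySem.Chars.count]
  simp only [List.isEmpty_cons, if_false, Bool.false_eq_true]
  simpa using count_go_single d s s.length 0 (le_refl _)

-- A's nested loop is the membership count over the concatenation of all lines
theorem countA_eq (gl : List String) (a : Int) :
    gl.foldl (fun count line =>
      line.toList.foldl (fun count c =>
        if c ∈ (['1','2','3','4','5','6'] : List Char) then count + 1 else count) count) a
    = a + ((gl.map String.toList).flatten.countP (· ∈ (['1','2','3','4','5','6'] : List Char)) : Int) := by
  induction gl generalizing a with
  | nil => simp
  | cons l ls ih =>
    simp only [List.foldl_cons, List.map_cons, List.flatten_cons, List.countP_append]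
    rw [ih]
    have h := PySem.List.foldl_count_if
      (fun c => decide (c ∈ (['1','2','3','4','5','6'] : List Char))) l.toList a
    simp only [decide_eq_true_eq] at h
    rw [h]
    push_cast
    ring

-- summing the six digits' individual counts is counting the digit characters
theorem sum_digit_counts (cs : List Char) :
    ((cs.countP (· ∈ (['1','2','3','4','5','6'] : List Char))) : Int)
      = ("123456".toList.map (fun d => (cs.count d : Int))).sum := by
  induction cs with
  | nil => decide
  | cons c cs ih =>
    simp only [List.countP_cons, List.count_cons,
      show "123456".toList = ['1','2','3','4','5','6'] from rfl,
      List.map_cons, List.map_nil, List.sum_cons, List.sum_nil] at *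
    push_cast at *
    by_cases h1 : c = '1' <;> by_cases h2 : c = '2' <;> by_cases h3 : c = '3' <;>
      by_cases h4 : c = '4' <;> by_cases h5 : c = '5' <;> by_cases h6 : c = '6' <;>
      simp_all <;> omega

-- ===== VERDICT =====
theorem count_bubbles_spec : Claim_equal_count_bubbles := by
  intro gl _
  show count_bubbles gl = count_bubbles_alt gl
  unfold count_bubbles count_bubbles_alt
  rw [countA_eq, sum_digit_counts]
  simp [PySem.Str.count_eq, chars_join_nil, count_single]
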